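-- pv_equiv track=rewrite | github.com/khusinboev/airesearch | uniconGrant/functions/lemma.py | wordToken
-- ===== SOURCE A (Python) =====
-- def wordToken(text):
--     result=[]
--     i=0
--     while(i<len(text)):
--         if(text[i]==' '):
--             result.append(text[:i])
--             if(i+1<len(text)):
--                 text=text[i+1:]
--                 i=0
--             else:
--                 break
--         else:
--             i+=1
--     return result
-- ===== SOURCE B (Python) =====
-- def wordToken(text):
--     spaces = [i for i, ch in enumerate(text) if ch == ' ']
--     result = []
--     start = 0
--     for s in spaces:
--         result.append(text[start:s])
--         start = s + 1
--     return result
-- ===== Notes on version B (the rewrite author's own statement) =====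
-- stated objective: faster
-- what changed: A rescans from index 0 after every space, repeatedly reslicing the remaining string in place; B makes one pass collecting all space indices and a second pass cutting one segment per index from the original string, never rebuilding it.
import Mathlib
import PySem

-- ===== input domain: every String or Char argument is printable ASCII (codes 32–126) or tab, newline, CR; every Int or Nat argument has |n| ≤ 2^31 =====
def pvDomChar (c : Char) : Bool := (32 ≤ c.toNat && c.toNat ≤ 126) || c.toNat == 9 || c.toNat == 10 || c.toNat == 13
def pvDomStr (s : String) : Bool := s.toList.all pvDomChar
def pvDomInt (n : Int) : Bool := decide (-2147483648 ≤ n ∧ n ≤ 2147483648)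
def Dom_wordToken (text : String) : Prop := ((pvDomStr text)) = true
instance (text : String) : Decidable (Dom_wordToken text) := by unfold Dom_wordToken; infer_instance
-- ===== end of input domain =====

-- B replaces A's restart-the-scan-on-a-shrinking-string loop by two passes (collect all
-- space indices, then cut one segment per space index); same return value everywhere.

-- ===== PORT A =====
-- A's while loop over the (repeatedly truncated) string; slices text[:i] / text[i+1:] with
-- nonnegative in-range indices are ported exactly as take / drop on the char list.
def wordTokenGo (cs : List Char) (i : Nat) (result : List String) : List String :=
  if h : i < cs.length then
    if cs[i] = ' ' then
      if i + 1 < cs.length then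
        wordTokenGo (cs.drop (i + 1)) 0 (result ++ [String.ofList (cs.take i)])
      else result ++ [String.ofList (cs.take i)]
    else wordTokenGo cs (i + 1) result
  else result
termination_by cs.length - i
decreasing_by
  · simp only [List.length_drop]; omega
  · omega

def wordToken (text : String) : List String := wordTokenGo text.toList 0 []

-- ===== PORT B =====
-- first pass of Source B: the comprehension over enumerate(text) collecting space positions
def wordTokenSpaces (cs : List Char) (i : Nat) : List Nat :=
  match cs with
  | [] => []
  | c :: rest =>
    if c = ' ' then i :: wordTokenSpaces rest (i + 1) else wordTokenSpaces rest (i + 1)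

-- second pass of Source B: fold over the space positions with the (result, start) state;
-- text[start:s] with 0 ≤ start ≤ s is ported exactly as drop/take on the char list.
def wordToken_alt (text : String) : List String :=
  let cs := text.toList
  ((wordTokenSpaces cs 0).foldl
    (fun (p : List String × Nat) s =>
      (p.1 ++ [String.ofList ((cs.drop p.2).take (s - p.2))], s + 1)) ([], 0)).1

-- ===== PRECONDITION & SPEC =====
def Spec_wordToken (text : String) (out : List String) : Prop := out = wordToken_alt text
instance (text : String) (out : List String) : Decidable (Spec_wordToken text out) := by unfold Spec_wordToken; infer_instance

-- ===== CLAIM (what is proved, stated in full; the proofs are below) =====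
def Claim_equal_wordToken : Prop := ∀ (text : String), Dom_wordToken text → Spec_wordToken text (wordToken text)

-- ===== LEMMAS AND PROOFS =====

/-- Reference tokenisation: one token per space, prefix chars accumulated into the
first pending token; used as the common meaning of both ports. -/
def pvConsHead (c : Char) : List (List Char) → List (List Char)
  | [] => []
  | t :: ts => (c :: t) :: ts

def pvTokSpec : List Char → List (List Char)
  | [] => []
  | c :: cs => if c = ' ' then [] :: pvTokSpec cs else pvConsHead c (pvTokSpec cs)

/-- Recursive form of B's second pass. -/
def pvSegG (cs : List Char) (st : Nat) : List Nat → List (List Char)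
  | [] => []
  | s :: r => ((cs.drop st).take (s - st)) :: pvSegG cs (s + 1) r

theorem pvFoldl_eq_segG (cs : List Char) (idxs : List Nat) :
    ∀ (acc : List String) (st : Nat),
      (idxs.foldl (fun (p : List String × Nat) s =>
          (p.1 ++ [String.ofList ((cs.drop p.2).take (s - p.2))], s + 1)) (acc, st)).1
        = acc ++ (pvSegG cs st idxs).map String.ofList := by
  induction idxs with
  | nil => intro acc st; simp [pvSegG]
  | cons s r ih =>
    intro acc st
    simp only [List.foldl_cons, pvSegG, List.map_cons]
    rw [ih]
    simp

theorem pvSegG_shift (c : Char) (cs : List Char) (idxs : List Nat) :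
    ∀ st : Nat, pvSegG (c :: cs) (st + 1) (idxs.map (· + 1)) = pvSegG cs st idxs := by
  induction idxs with
  | nil => intro st; simp [pvSegG]
  | cons s r ih =>
    intro st
    simp only [List.map_cons, pvSegG, List.drop_succ_cons]
    rw [Nat.add_sub_add_right]
    exact congrArg _ (ih (s + 1))

theorem pvSegG_cons_nonspace (c : Char) (cs : List Char) (idxs : List Nat) :
    pvSegG (c :: cs) 0 (idxs.map (· + 1)) = pvConsHead c (pvSegG cs 0 idxs) := by
  cases idxs with
  | nil => simp [pvSegG, pvConsHead]
  | cons s r =>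
    simp only [List.map_cons, pvSegG, pvConsHead, Nat.sub_zero, List.drop_zero,
      List.take_succ_cons]
    exact congrArg _ (pvSegG_shift c cs r (s + 1))

theorem pvSpaces_shift (cs : List Char) : ∀ i : Nat,
    wordTokenSpaces cs (i + 1) = (wordTokenSpaces cs i).map (· + 1) := by
  induction cs with
  | nil => intro i; simp [wordTokenSpaces]
  | cons c rest ih =>
    intro i
    simp only [wordTokenSpaces]
    by_cases hc : c = ' ' <;> simp [hc, ih (i + 1), ih i]

theorem pvSegG_spaces (cs : List Char) :
    pvSegG cs 0 (wordTokenSpaces cs 0) = pvTokSpec cs := by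
  induction cs with
  | nil => simp [pvSegG, wordTokenSpaces, pvTokSpec]
  | cons c rest ih =>
    by_cases hc : c = ' '
    · subst hc
      have hsp : wordTokenSpaces (' ' :: rest) 0 = 0 :: (wordTokenSpaces rest 0).map (· + 1) := by
        simp [wordTokenSpaces, pvSpaces_shift]
      rw [hsp]
      show ([] : List Char) :: pvSegG (' ' :: rest) (0 + 1) ((wordTokenSpaces rest 0).map (· + 1))
          = pvTokSpec (' ' :: rest)
      rw [pvSegG_shift, ih]
      simp [pvTokSpec]
    · simp only [wordTokenSpaces, pvTokSpec, if_neg hc, pvSpaces_shift]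
      rw [pvSegG_cons_nonspace, ih]

theorem pvAlt_eq (text : String) :
    wordToken_alt text = (pvTokSpec text.toList).map String.ofList := by
  unfold wordToken_alt
  rw [pvFoldl_eq_segG, pvSegG_spaces]
  simp

theorem pvTokSpec_nil (cs : List Char)
    (h : ∀ j (hj : j < cs.length), cs[j] ≠ ' ') : pvTokSpec cs = [] := by
  induction cs with
  | nil => rfl
  | cons c rest ih =>
    have hc : c ≠ ' ' := h 0 (by simp)
    have : pvTokSpec rest = [] := ih (fun j hj => h (j + 1) (by simpa using Nat.succ_lt_succ hj))
    simp [pvTokSpec, hc, this, pvConsHead]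

theorem pvTokSpec_split : ∀ (i : Nat) (cs : List Char) (h : i < cs.length),
    cs[i] = ' ' → (∀ j (hj : j < i), cs[j]'(by omega) ≠ ' ') →
    pvTokSpec cs = cs.take i :: pvTokSpec (cs.drop (i + 1)) := by
  intro i
  induction i with
  | zero =>
    intro cs h hsp _
    cases cs with
    | nil => simp at h
    | cons c rest =>
      simp only [List.getElem_cons_zero] at hsp
      simp [pvTokSpec, hsp]
  | succ i ih =>
    intro cs h hsp hpre
    cases cs with
    | nil => simp at h
    | cons c rest =>
      have hc : c ≠ ' ' := hpre 0 (Nat.succ_pos i)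
      have h' : i < rest.length := by simpa using h
      have hsp' : rest[i] = ' ' := by simpa using hsp
      have hpre' : ∀ j (hj : j < i), rest[j]'(by omega) ≠ ' ' := by
        intro j hj
        have := hpre (j + 1) (Nat.succ_lt_succ hj)
        simpa using this
      simp only [pvTokSpec, if_neg hc, ih rest h' hsp' hpre', pvConsHead,
        List.take_succ_cons, List.drop_succ_cons]

theorem pvGo_eq : ∀ (cs : List Char) (i : Nat) (acc : List String)
    (hle : i ≤ cs.length), (∀ j (hj : j < i), cs[j]'(by omega) ≠ ' ') →
    wordTokenGo cs i acc = acc ++ (pvTokSpec cs).map String.ofList := by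
  intro cs i acc
  induction cs, i, acc using wordTokenGo.induct with
  | case1 cs i acc h hsp h2 ih =>
    intro hle hpre
    rw [wordTokenGo, dif_pos h, if_pos hsp, if_pos h2]
    rw [ih (Nat.zero_le _) (fun j hj => absurd hj (by omega))]
    rw [pvTokSpec_split i cs h hsp hpre]
    simp
  | case2 cs i acc h hsp h2 =>
    intro hle hpre
    rw [wordTokenGo, dif_pos h, if_pos hsp, if_neg h2]
    rw [pvTokSpec_split i cs h hsp hpre]
    have hnil : cs.drop (i + 1) = [] := List.drop_eq_nil_of_le (by omega)
    rw [hnil]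
    simp [pvTokSpec]
  | case3 cs i acc h hsp ih =>
    intro hle hpre
    rw [wordTokenGo, dif_pos h, if_neg hsp]
    apply ih (by omega)
    intro j hj
    rcases Nat.lt_succ_iff_lt_or_eq.mp hj with hlt | rfl
    · exact hpre j hlt
    · exact hsp
  | case4 cs i acc h =>
    intro hle hpre
    rw [wordTokenGo, dif_neg h]
    have : pvTokSpec cs = [] := pvTokSpec_nil cs (fun j hj => hpre j (by omega))
    simp [this]

-- ===== VERDICT (by name: the statement is the Claim_ definition above) =====
theorem wordToken_spec : Claim_equal_wordToken := by
  intro text _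
  unfold Spec_wordToken wordToken
  rw [pvGo_eq text.toList 0 [] (Nat.zero_le _) (by intro j hj; omega), pvAlt_eq]
  simp
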